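-- pv_equiv track=rewrite | github.com/jcval94/floor | src/floor/reporting/generate_site_data.py | _dedupe_latest_predictions
-- ===== SOURCE A (Python) =====
-- from typing import Any
--
-- def _safe_ts(value: Any) -> str:
--     text = str(value or "").strip()
--     return text
--
-- def _dedupe_latest_predictions(rows: list[dict]) -> list[dict]:
--     """Keep the latest prediction per (symbol, horizon), sorted deterministically."""
--     latest: dict[tuple[str, str], tuple[str, int, dict]] = {}
--     for idx, row in enumerate(rows):
--         symbol = str(row.get("symbol", "")).upper()
--         horizon = str(row.get("horizon", "")).lower()
--         if not symbol or not horizon: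
--             continue
--         ts = _safe_ts(row.get("as_of"))
--         key = (symbol, horizon)
--         prev = latest.get(key)
--         if prev is None or (ts, idx) >= (prev[0], prev[1]):
--             latest[key] = (ts, idx, row)
--     return [item[2] for item in sorted(latest.values(), key=lambda x: (str(x[2].get("symbol", "")), str(x[2].get("horizon", ""))))]
-- ===== SOURCE B (Python) =====
-- def _dedupe_latest_predictions(rows: list[dict]) -> list[dict]:
--     """Keep the latest prediction per (symbol, horizon), sorted deterministically."""
--     valid = []
--     for idx, row in enumerate(rows):
--         symbol = str(row.get("symbol", "")).upper()
--         horizon = str(row.get("horizon", "")).lower()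
--         if symbol and horizon:
--             ts = str(row.get("as_of") or "").strip()
--             valid.append((symbol, horizon, ts, idx, row))
--     survivors = [row for (s, h, ts, idx, row) in valid
--                  if not any(s2 == s and h2 == h and (ts, idx) < (ts2, i2)
--                             for (s2, h2, ts2, i2, _r) in valid)]
--     return sorted(survivors, key=lambda r: (str(r.get("symbol", "")), str(r.get("horizon", ""))))
-- ===== Notes on version B (the rewrite author's own statement) =====
-- stated objective: alternative
-- what changed: A keeps a running dict of the latest (ts, idx) entry per normalized (symbol, horizon) key; B instead annotates all valid rows once and selects each group's survivor by a direct 'no strictly later same-key entry exists' filter, then sorts by the raw key pair.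
import Mathlib
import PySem

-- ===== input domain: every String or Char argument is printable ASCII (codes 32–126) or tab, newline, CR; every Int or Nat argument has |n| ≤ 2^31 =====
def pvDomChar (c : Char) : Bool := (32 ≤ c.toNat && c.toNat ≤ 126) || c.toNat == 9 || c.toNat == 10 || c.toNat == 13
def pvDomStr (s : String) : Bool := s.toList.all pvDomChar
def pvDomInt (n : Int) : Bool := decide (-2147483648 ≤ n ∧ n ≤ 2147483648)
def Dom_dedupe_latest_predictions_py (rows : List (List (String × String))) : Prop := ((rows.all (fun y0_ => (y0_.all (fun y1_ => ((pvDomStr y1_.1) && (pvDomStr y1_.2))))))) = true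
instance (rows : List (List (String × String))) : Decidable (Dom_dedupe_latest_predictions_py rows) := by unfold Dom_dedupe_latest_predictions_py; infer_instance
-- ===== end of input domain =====

-- B replaces A's running dict-of-latest with a brute-force "is this entry the group maximum?" filter
-- over an annotated list (alternative decomposition, same results; not claimed faster).


-- row.get(k, d): first-match lookup in the association list (dict) row
def pvGet (row : List (String × String)) (k d : String) : String :=
  (PySem.Dict.mk row).getD k d

-- ===== PORT A =====
-- _safe_ts(value): str(value or "").strip() — value is row.get("as_of") : Option String;
-- str(x or "") on a str-or-None value is exactly (value.getD "") (str is identity on str)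
def safe_ts_py (value : Option String) : String :=
  PySem.Str.strip (value.getD "")

def dedupe_latest_predictions_py (rows : List (List (String × String))) : List (List (String × String)) :=
  let latest : PySem.Dict (String × String) (String × Int × List (String × String)) :=
    (PySem.List.enumerate rows 0).foldl (fun latest p =>
      let symbol := PySem.Str.upper (pvGet p.2 "symbol" "")
      let horizon := PySem.Str.lower (pvGet p.2 "horizon" "")
      if symbol = "" ∨ horizon = "" then latest
      else
        let ts := safe_ts_py ((PySem.Dict.mk p.2).get? "as_of")
        let key := (symbol, horizon)
        match latest.get? key with
        | none => latest.insert key (ts, p.1, p.2)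
        -- (ts, idx) >= (prev[0], prev[1]) : lexicographic on (str, int)
        | some prev =>
            if decide (prev.1 < ts) || (prev.1 == ts && decide (prev.2.1 ≤ p.1))
            then latest.insert key (ts, p.1, p.2) else latest)
      PySem.Dict.empty
  (PySem.List.sorted2 latest.values
      (fun x => pvGet x.2.2 "symbol" "") (fun x => pvGet x.2.2 "horizon" "")).map (fun x => x.2.2)

-- ===== PORT B =====
def dedupe_latest_predictions_py_alt (rows : List (List (String × String))) : List (List (String × String)) :=
  let valid : List (String × String × String × Int × List (String × String)) :=
    (PySem.List.enumerate rows 0).foldl (fun acc p =>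
      let symbol := PySem.Str.upper (pvGet p.2 "symbol" "")
      let horizon := PySem.Str.lower (pvGet p.2 "horizon" "")
      if symbol ≠ "" ∧ horizon ≠ "" then
        acc ++ [(symbol, horizon, PySem.Str.strip (((PySem.Dict.mk p.2).get? "as_of").getD ""), p.1, p.2)]
      else acc) []
  let survivors :=
    (valid.filter (fun e => ! valid.any (fun e2 =>
        e2.1 == e.1 && e2.2.1 == e.2.1 &&
        -- (ts, idx) < (ts2, i2) : strict lexicographic on (str, int)
        (decide (e.2.2.1 < e2.2.2.1) || (e.2.2.1 == e2.2.2.1 && decide (e.2.2.2.1 < e2.2.2.2.1))))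
      )).map (fun e => e.2.2.2.2)
  PySem.List.sorted2 survivors (fun r => pvGet r "symbol" "") (fun r => pvGet r "horizon" "")

-- ===== PRECONDITION & SPEC =====
def Spec_dedupe_latest_predictions_py (rows : List (List (String × String))) (out : List (List (String × String))) : Prop := out = dedupe_latest_predictions_py_alt rows
instance (rows : List (List (String × String))) (out : List (List (String × String))) : Decidable (Spec_dedupe_latest_predictions_py rows out) := by unfold Spec_dedupe_latest_predictions_py; infer_instance

-- ===== CLAIM (what is proved, stated in full; the proofs are below) =====
def Claim_equal_dedupe_latest_predictions_py : Prop := ∀ (rows : List (List (String × String))), Dom_dedupe_latest_predictions_py rows → Spec_dedupe_latest_predictions_py rows (dedupe_latest_predictions_py rows)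

-- ===== LEMMAS AND PROOFS =====

def pvNorm (row : List (String × String)) : String × String :=
  (PySem.Str.upper (pvGet row "symbol" ""), PySem.Str.lower (pvGet row "horizon" ""))
def pvTs (row : List (String × String)) : String := PySem.Str.strip (((PySem.Dict.mk row).get? "as_of").getD "")
def pvEntry (p : Int × List (String × String)) : String × String × String × Int × List (String × String) :=
  ((pvNorm p.2).1, (pvNorm p.2).2, pvTs p.2, p.1, p.2)
def pvKey (e : String × String × String × Int × List (String × String)) : String × String := (e.1, e.2.1)
def pvGE (prev : String × Int × List (String × String))
    (e : String × String × String × Int × List (String × String)) : Bool :=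
  decide (prev.1 < e.2.2.1) || (prev.1 == e.2.2.1 && decide (prev.2.1 ≤ e.2.2.2.1))
def pvTrip (e : String × String × String × Int × List (String × String)) : String × Int × List (String × String) := (e.2.2.1, e.2.2.2.1, e.2.2.2.2)
def pvAnn : List (Int × List (String × String)) → List (String × String × String × Int × List (String × String))
  | [] => []
  | p :: z => if (pvNorm p.2).1 = "" ∨ (pvNorm p.2).2 = "" then pvAnn z else pvEntry p :: pvAnn z
def pvStepA (d : PySem.Dict (String × String) (String × Int × List (String × String)))
    (p : Int × List (String × String)) : PySem.Dict (String × String) (String × Int × List (String × String)) :=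
  if (pvNorm p.2).1 = "" ∨ (pvNorm p.2).2 = "" then d
  else
    match d.get? (pvKey (pvEntry p)) with
    | none => d.insert (pvKey (pvEntry p)) (pvTrip (pvEntry p))
    | some prev => if pvGE prev (pvEntry p) then d.insert (pvKey (pvEntry p)) (pvTrip (pvEntry p)) else d

lemma pv_foldB_eq (z : List (Int × List (String × String)))
    (acc : List (String × String × String × Int × List (String × String))) :
    z.foldl (fun acc p =>
      let symbol := PySem.Str.upper (pvGet p.2 "symbol" "")
      let horizon := PySem.Str.lower (pvGet p.2 "horizon" "")
      if symbol ≠ "" ∧ horizon ≠ "" then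
        acc ++ [(symbol, horizon, PySem.Str.strip (((PySem.Dict.mk p.2).get? "as_of").getD ""), p.1, p.2)]
      else acc) acc = acc ++ pvAnn z := by
  induction z generalizing acc with
  | nil => simp [pvAnn]
  | cons p z ih =>
      by_cases h : (pvNorm p.2).1 = "" ∨ (pvNorm p.2).2 = ""
      · rcases h with h | h <;>
        · simp only [List.foldl_cons, pvAnn]
          rw [ih]
          simp [pvNorm] at h ⊢
          simp [h, pvAnn]
      · push_neg at h
        simp only [List.foldl_cons]
        rw [ih]
        simp only [pvAnn, pvNorm, pvEntry, pvTs]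
        simp [pvNorm] at h
        simp [h.1, h.2, List.append_assoc]

def pvIdx (e : String × String × String × Int × List (String × String)) : Int := e.2.2.2.1
def pvRow (e : String × String × String × Int × List (String × String)) : List (String × String) := e.2.2.2.2
def pvTsi (e : String × String × String × Int × List (String × String)) : String ×ₗ Int := toLex (e.2.2.1, e.2.2.2.1)

lemma pv_mem_ann {z : List (Int × List (String × String))} {e} (he : e ∈ pvAnn z) :
    ∃ p ∈ z, e = pvEntry p := by
  induction z with
  | nil => simp [pvAnn] at he
  | cons p z ih =>
      simp only [pvAnn] at he
      split at he
      · obtain ⟨q, hq, he⟩ := ih he; exact ⟨q, List.mem_cons_of_mem _ hq, he⟩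
      · rcases List.mem_cons.1 he with h | h
        · exact ⟨p, List.mem_cons_self, h⟩
        · obtain ⟨q, hq, he⟩ := ih h; exact ⟨q, List.mem_cons_of_mem _ hq, he⟩

lemma pv_key_of_mem_ann {z : List (Int × List (String × String))} {e} (he : e ∈ pvAnn z) :
    pvKey e = pvNorm (pvRow e) := by
  obtain ⟨p, _, rfl⟩ := pv_mem_ann he
  rfl

lemma pv_ann_sublist (z : List (Int × List (String × String))) :
    (pvAnn z).Sublist (z.map pvEntry) := by
  induction z with
  | nil => simp [pvAnn]
  | cons p z ih =>
      simp only [pvAnn, List.map_cons]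
      split
      · exact ih.cons _
      · exact ih.cons₂ _

lemma pv_ann_pairwise_idx (rows : List (List (String × String))) :
    (pvAnn (PySem.List.enumerate rows 0)).Pairwise (fun a b => pvIdx a < pvIdx b) := by
  have h := PySem.List.pairwise_lt_enumerate (xs := rows) (s := 0)
  have h2 : ((PySem.List.enumerate rows 0).map pvEntry).Pairwise (fun a b => pvIdx a < pvIdx b) := by
    refine List.pairwise_map.2 (h.imp ?_)
    intro a b hab
    simpa [pvEntry, pvIdx] using hab
  exact List.Pairwise.sublist (pv_ann_sublist _) h2

def pvStepBest (k : String × String)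
    (acc : Option (String × Int × List (String × String)))
    (e : String × String × String × Int × List (String × String)) :
    Option (String × Int × List (String × String)) :=
  if pvKey e == k then
    match acc with
    | none => some (pvTrip e)
    | some prev => if pvGE prev e then some (pvTrip e) else prev
  else acc

lemma pv_stepA_get (d : PySem.Dict (String × String) (String × Int × List (String × String)))
    (p : Int × List (String × String)) (k : String × String)
    (hv : ¬ ((pvNorm p.2).1 = "" ∨ (pvNorm p.2).2 = "")) :
    (pvStepA d p).get? k = pvStepBest k (d.get? k) (pvEntry p) := by
  simp only [pvStepA, if_neg hv, pvStepBest]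
  by_cases hk : pvKey (pvEntry p) = k
  · subst hk
    simp only [beq_self_eq_true, if_true]
    cases h : d.get? (pvKey (pvEntry p)) with
    | none => simp [PySem.Dict.get?_insert_self]
    | some prev =>
        by_cases hge : pvGE prev (pvEntry p) <;>
          simp [hge, PySem.Dict.get?_insert_self, h]
  · have hbeq : (pvKey (pvEntry p) == k) = false := beq_false_of_ne hk
    simp only [hbeq, if_false]
    cases h : d.get? (pvKey (pvEntry p)) with
    | none => exact PySem.Dict.get?_insert_of_ne d _ (Ne.symm hk)
    | some prev =>
        by_cases hge : pvGE prev (pvEntry p)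
        · simp only [hge, if_true]; exact PySem.Dict.get?_insert_of_ne d _ (Ne.symm hk)
        · simp [hge]

lemma pv_foldA_get (z : List (Int × List (String × String)))
    (d : PySem.Dict (String × String) (String × Int × List (String × String)))
    (k : String × String) :
    (z.foldl pvStepA d).get? k = (pvAnn z).foldl (pvStepBest k) (d.get? k) := by
  induction z generalizing d with
  | nil => simp [pvAnn]
  | cons p z ih =>
      by_cases hv : (pvNorm p.2).1 = "" ∨ (pvNorm p.2).2 = ""
      · simp only [List.foldl_cons, pvAnn, if_pos hv]
        rw [ih, pvStepA, if_pos hv]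
      · simp only [List.foldl_cons, pvAnn, if_neg hv, List.foldl_cons]
        rw [ih, pv_stepA_get d p k hv]

lemma pv_foldA_contains (z : List (Int × List (String × String)))
    (d : PySem.Dict (String × String) (String × Int × List (String × String)))
    (k : String × String) :
    (z.foldl pvStepA d).contains k
      = (d.contains k || (pvAnn z).any (fun e => pvKey e == k)) := by
  induction z generalizing d with
  | nil => simp [pvAnn]
  | cons p z ih =>
      by_cases hv : (pvNorm p.2).1 = "" ∨ (pvNorm p.2).2 = ""
      · simp only [List.foldl_cons, pvAnn, if_pos hv]
        rw [ih, pvStepA, if_pos hv]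
      · simp only [List.foldl_cons, pvAnn, if_neg hv, List.any_cons]
        rw [ih]
        have hc : (pvStepA d p).contains k = ((pvKey (pvEntry p) == k) || d.contains k) := by
          simp only [pvStepA, if_neg hv]
          cases h : d.get? (pvKey (pvEntry p)) with
          | none => rw [PySem.Dict.contains_insert]; rw [BEq.comm]
          | some prev =>
              by_cases hge : pvGE prev (pvEntry p)
              · simp only [hge, if_true]; rw [PySem.Dict.contains_insert, BEq.comm]
              · simp only [hge, if_false, Bool.if_false_right, Bool.and_true]
                by_cases hk : pvKey (pvEntry p) = k
                · subst hk
                  simp [PySem.Dict.contains_eq_isSome_get?, h]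
                · simp [beq_false_of_ne hk]
        rw [hc, Bool.or_assoc, Bool.or_comm (d.contains k)]
        ac_rfl

lemma pv_foldA_nodup_keys (z : List (Int × List (String × String)))
    (d : PySem.Dict (String × String) (String × Int × List (String × String)))
    (hd : d.keys.Nodup) : (z.foldl pvStepA d).keys.Nodup := by
  induction z generalizing d with
  | nil => exact hd
  | cons p z ih =>
      rw [List.foldl_cons]; refine ih _ ?_
      simp only [pvStepA]
      split
      · exact hd
      · split
        · exact PySem.Dict.nodup_keys_insert _ _ _ hd
        · split
          · exact PySem.Dict.nodup_keys_insert _ _ _ hd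
          · exact hd

lemma pv_ge_iff (prev : String × Int × List (String × String))
    (e : String × String × String × Int × List (String × String)) :
    pvGE prev e = true ↔ (toLex (prev.1, prev.2.1) : String ×ₗ Int) ≤ pvTsi e := by
  simp [pvGE, pvTsi, Prod.Lex.le_iff]

lemma pv_tsi_trip (e : String × String × String × Int × List (String × String)) :
    (toLex ((pvTrip e).1, (pvTrip e).2.1) : String ×ₗ Int) = pvTsi e := rfl

lemma pv_best_none (l : List (String × String × String × Int × List (String × String)))
    (k : String × String) (h : l.foldl (pvStepBest k) none = none) :
    ∀ e ∈ l, pvKey e ≠ k := by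
  induction l using List.reverseRecOn with
  | nil => simp
  | append_singleton l e ih =>
      rw [List.foldl_append, List.foldl_cons, List.foldl_nil] at h
      intro e' he'
      rcases List.mem_append.1 he' with he' | he'
      · refine ih ?_ e' he'
        by_cases hk : pvKey e == k
        · simp only [pvStepBest, hk, if_true] at h
          cases hF : List.foldl (pvStepBest k) none l <;> simp [hF] at h <;> split at h <;> simp_all
        · simp only [pvStepBest, hk, Bool.false_eq_true, if_false] at h; exact h
      · simp only [List.mem_singleton] at he'; subst he'
        intro hk
        simp only [pvStepBest, hk, beq_self_eq_true, if_true] at h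
        cases hF : List.foldl (pvStepBest k) none l <;> simp [hF] at h
        split at h <;> simp_all

lemma pv_best_spec (l : List (String × String × String × Int × List (String × String)))
    (k : String × String) (t : String × Int × List (String × String))
    (h : l.foldl (pvStepBest k) none = some t) :
    ∃ e ∈ l, pvKey e = k ∧ pvTrip e = t ∧ ∀ e' ∈ l, pvKey e' = k → pvTsi e' ≤ pvTsi e := by
  induction l using List.reverseRecOn generalizing t with
  | nil => simp at h
  | append_singleton l e ih =>
      rw [List.foldl_append, List.foldl_cons, List.foldl_nil] at h
      by_cases hk : pvKey e = k
      · simp only [pvStepBest, hk, beq_self_eq_true, if_true] at h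
        cases hF : List.foldl (pvStepBest k) none l with
        | none =>
            rw [hF] at h
            simp only [Option.some.injEq] at h
            refine ⟨e, by simp, hk, h, ?_⟩
            intro e' he' hk'
            rcases List.mem_append.1 he' with he' | he'
            · exact absurd hk' (pv_best_none l k hF e' he')
            · simp only [List.mem_singleton] at he'; subst he'; exact le_refl _
        | some prev =>
            rw [hF] at h
            obtain ⟨em, hem, hkm, htm, hmax⟩ := ih prev hF
            by_cases hge : pvGE prev e
            · simp only [hge, if_true, Option.some.injEq] at h
              refine ⟨e, by simp, hk, h, ?_⟩
              have hle : pvTsi em ≤ pvTsi e := by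
                have := (pv_ge_iff prev e).1 hge
                rwa [← htm, pv_tsi_trip] at this
              intro e' he' hk'
              rcases List.mem_append.1 he' with he' | he'
              · exact le_trans (hmax e' he' hk') hle
              · simp only [List.mem_singleton] at he'; subst he'; exact le_refl _
            · simp only [hge, Bool.false_eq_true, if_false, Option.some.injEq] at h
              subst h
              refine ⟨em, List.mem_append.2 (Or.inl hem), hkm, htm, ?_⟩
              intro e' he' hk'
              rcases List.mem_append.1 he' with he' | he'
              · exact hmax e' he' hk'
              · simp only [List.mem_singleton] at he'; subst he'
                have : ¬ ((toLex (prev.1, prev.2.1) : String ×ₗ Int) ≤ pvTsi e') := by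
                  intro hc; exact hge ((pv_ge_iff prev e').2 hc)
                rw [← htm, pv_tsi_trip] at this
                exact le_of_lt (not_le.mp this)
      · have hbeq : (pvKey e == k) = false := beq_false_of_ne hk
        simp only [pvStepBest, hbeq, Bool.false_eq_true, if_false] at h
        obtain ⟨em, hem, hkm, htm, hmax⟩ := ih t h
        refine ⟨em, List.mem_append.2 (Or.inl hem), hkm, htm, ?_⟩
        intro e' he' hk'
        rcases List.mem_append.1 he' with he' | he'
        · exact hmax e' he' hk'
        · simp only [List.mem_singleton] at he'; subst he'; exact absurd hk' hk

def pvKeep (l : List (String × String × String × Int × List (String × String)))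
    (e : String × String × String × Int × List (String × String)) : Bool :=
  ! l.any (fun e2 =>
      e2.1 == e.1 && e2.2.1 == e.2.1 &&
      (decide (e.2.2.1 < e2.2.2.1) || (e.2.2.1 == e2.2.2.1 && decide (e.2.2.2.1 < e2.2.2.2.1))))

lemma pv_keep_iff (l : List (String × String × String × Int × List (String × String))) (e) :
    pvKeep l e = true ↔ ∀ e2 ∈ l, pvKey e2 = pvKey e → pvTsi e2 ≤ pvTsi e := by
  have hb : ∀ e2 : String × String × String × Int × List (String × String),
      (decide (e.2.2.1 < e2.2.2.1) || (e.2.2.1 == e2.2.2.1 && decide (e.2.2.2.1 < e2.2.2.2.1)))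
        = decide (pvTsi e < pvTsi e2) := by
    intro e2
    by_cases h1 : e.2.2.1 < e2.2.2.1 <;> by_cases h2 : e.2.2.1 = e2.2.2.1 <;>
      by_cases h3 : e.2.2.2.1 < e2.2.2.2.1 <;> simp [pvTsi, Prod.Lex.lt_iff, h1, h2, h3]
  simp only [pvKeep, Bool.not_eq_eq_eq_not, Bool.not_true, List.any_eq_false]
  refine ⟨fun h e2 he2 hk => ?_, fun h e2 he2 => ?_⟩
  · have := h e2 he2
    have hk' : e2.1 = e.1 ∧ e2.2.1 = e.2.1 := by
      simpa [pvKey, Prod.ext_iff] using hk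
    rw [hk'.1, hk'.2, hb e2] at this
    simpa [not_lt] using this
  · by_cases hk : pvKey e2 = pvKey e
    · have hk' : e2.1 = e.1 ∧ e2.2.1 = e.2.1 := by
        simpa [pvKey, Prod.ext_iff] using hk
      rw [hk'.1, hk'.2, hb e2]
      simpa [not_lt] using h e2 he2 hk
    · have : ¬ (e2.1 = e.1 ∧ e2.2.1 = e.2.1) := by
        intro hc; exact hk (by simp [pvKey, Prod.ext_iff, hc.1, hc.2])
      rcases not_and_or.mp this with hk1 | hk1 <;> simp [beq_false_of_ne hk1]

lemma pv_eq_of_idx {l : List (String × String × String × Int × List (String × String))}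
    (hp : l.Pairwise (fun a b => pvIdx a < pvIdx b)) {e e'} (he : e ∈ l) (he' : e' ∈ l)
    (h : pvIdx e = pvIdx e') : e = e' := by
  induction l with
  | nil => simp at he
  | cons a tl ih =>
      rw [List.pairwise_cons] at hp
      rcases List.mem_cons.1 he with h1 | h1 <;> rcases List.mem_cons.1 he' with h2 | h2
      · rw [h1, h2]
      · subst h1; exact absurd h (ne_of_lt (hp.1 e' h2))
      · subst h2; exact absurd h.symm (ne_of_lt (hp.1 e h1))
      · exact ih hp.2 h1 h2

lemma pv_filter_pairwise_key {l : List (String × String × String × Int × List (String × String))}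
    (hp : l.Pairwise (fun a b => pvIdx a < pvIdx b)) :
    (l.filter (pvKeep l)).Pairwise (fun a b => pvKey a ≠ pvKey b) := by
  have hsub : (l.filter (pvKeep l)).Sublist l := (List.filter_sublist : (l.filter (pvKeep l)).Sublist l)
  have hp2 : (l.filter (pvKeep l)).Pairwise (fun a b => pvIdx a < pvIdx b) :=
    List.Pairwise.sublist hsub hp
  refine List.Pairwise.imp_of_mem ?_ hp2
  intro a b ha hb hlt hkeq
  have ha' := List.mem_filter.1 ha
  have hb' := List.mem_filter.1 hb
  have h1 := (pv_keep_iff l a).1 ha'.2 b hb'.1 hkeq.symm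
  have h2 := (pv_keep_iff l b).1 hb'.2 a ha'.1 hkeq
  have : pvTsi a = pvTsi b := le_antisymm h2 h1
  have : pvIdx a = pvIdx b := by
    have := congrArg (fun x => (ofLex x).2) this
    simpa [pvTsi, pvIdx] using this
  exact absurd this (ne_of_lt hlt)

lemma pv_trip_row (e : String × String × String × Int × List (String × String)) :
    (pvTrip e).2.2 = pvRow e := rfl

lemma pv_argmax_mem (rows : List (List (String × String))) (k : String × String)
    (hk : k ∈ ((PySem.List.enumerate rows 0).foldl pvStepA PySem.Dict.empty).keys) :
    ∃ e ∈ (pvAnn (PySem.List.enumerate rows 0)).filter (pvKeep (pvAnn (PySem.List.enumerate rows 0))),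
      pvKey e = k ∧
      ((PySem.List.enumerate rows 0).foldl pvStepA PySem.Dict.empty).getD k ("", 0, []) = pvTrip e ∧
      ∀ e' ∈ pvAnn (PySem.List.enumerate rows 0), pvKey e' = k → pvTsi e' ≤ pvTsi e := by
  set z := PySem.List.enumerate rows 0 with hz
  set L := z.foldl pvStepA PySem.Dict.empty with hL
  have hget : ∀ j, L.get? j = (pvAnn z).foldl (pvStepBest j) none := by
    intro j; rw [hL, pv_foldA_get]; rw [PySem.Dict.get?_empty]
  have hc : L.contains k = true := (PySem.Dict.contains_iff_mem_keys L k).2 hk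
  rw [PySem.Dict.contains_eq_isSome_get?] at hc
  obtain ⟨t, ht⟩ := Option.isSome_iff_exists.mp hc
  obtain ⟨e, he, hke, hte, hmax⟩ := pv_best_spec (pvAnn z) k t (by rw [← hget k]; exact ht)
  refine ⟨e, List.mem_filter.2 ⟨he, (pv_keep_iff (pvAnn z) e).2 ?_⟩, hke, ?_, ?_⟩
  · intro e2 he2 hk2
    exact hmax e2 he2 (by rw [hk2, hke])
  · rw [PySem.Dict.getD_eq_get?_getD, ht, Option.getD_some, hte]
  · exact hmax

lemma pv_arg_unique (rows : List (List (String × String))) (e : _)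
    (he : e ∈ (pvAnn (PySem.List.enumerate rows 0)).filter (pvKeep (pvAnn (PySem.List.enumerate rows 0)))) :
    ((PySem.List.enumerate rows 0).foldl pvStepA PySem.Dict.empty).getD (pvKey e) ("", 0, []) = pvTrip e := by
  set z := PySem.List.enumerate rows 0 with hz
  have he' := List.mem_filter.1 he
  have hkmem : pvKey e ∈ (z.foldl pvStepA PySem.Dict.empty).keys := by
    rw [← PySem.Dict.contains_iff_mem_keys, pv_foldA_contains]
    simp only [PySem.Dict.contains_empty, Bool.false_or, List.any_eq_true]
    exact ⟨e, he'.1, by simp⟩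
  obtain ⟨em, hem, hkem, hgetm, hmaxm⟩ := pv_argmax_mem rows (pvKey e) hkmem
  have hem' := List.mem_filter.1 hem
  have h1 : pvTsi e ≤ pvTsi em := hmaxm e he'.1 rfl
  have h2 : pvTsi em ≤ pvTsi e :=
    (pv_keep_iff (pvAnn z) e).1 he'.2 em hem'.1 hkem
  have htsi : pvTsi em = pvTsi e := le_antisymm h2 h1
  have hidx : pvIdx em = pvIdx e := by
    have := congrArg (fun x => (ofLex x).2) htsi
    simpa [pvTsi, pvIdx] using this
  have : em = e := pv_eq_of_idx (pv_ann_pairwise_idx rows) hem'.1 he'.1 hidx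
  rw [hgetm, this]

lemma pv_values_perm (rows : List (List (String × String))) :
    (((PySem.List.enumerate rows 0).foldl pvStepA PySem.Dict.empty).values).Perm
      (((pvAnn (PySem.List.enumerate rows 0)).filter
          (pvKeep (pvAnn (PySem.List.enumerate rows 0)))).map pvTrip) := by
  set z := PySem.List.enumerate rows 0 with hz
  set L := z.foldl pvStepA PySem.Dict.empty with hL
  set flt := (pvAnn z).filter (pvKeep (pvAnn z)) with hflt
  have hnk : L.keys.Nodup := pv_foldA_nodup_keys z _ PySem.Dict.nodup_keys_empty
  have hv : L.values = L.keys.map (fun k => L.getD k ("", 0, [])) :=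
    PySem.Dict.values_eq_map_keys L hnk _
  have hsubann : ∀ e, e ∈ flt → e ∈ pvAnn z := fun e he => (List.mem_filter.1 he).1
  -- Nodup of the values list
  have nd1 : L.values.Nodup := by
    rw [hv]
    refine List.Nodup.map_on ?_ hnk
    intro k1 hk1 k2 hk2 heq
    obtain ⟨e1, he1, hke1, hg1, -⟩ := pv_argmax_mem rows k1 hk1
    obtain ⟨e2, he2, hke2, hg2, -⟩ := pv_argmax_mem rows k2 hk2
    rw [hg1, hg2] at heq
    have hrow : pvRow e1 = pvRow e2 := by rw [← pv_trip_row, ← pv_trip_row, heq]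
    rw [← hke1, ← hke2, pv_key_of_mem_ann (hsubann e1 he1), pv_key_of_mem_ann (hsubann e2 he2), hrow]
  have nd2 : (flt.map pvTrip).Nodup := by
    have hpk := pv_filter_pairwise_key (pv_ann_pairwise_idx rows)
    rw [List.Nodup, List.pairwise_map]
    refine hpk.imp_of_mem ?_
    intro a b ha hb hne heq
    have hrow : pvRow a = pvRow b := by rw [← pv_trip_row, ← pv_trip_row, heq]
    exact hne (by rw [pv_key_of_mem_ann (hsubann a ha), pv_key_of_mem_ann (hsubann b hb), hrow])
  refine (List.perm_ext_iff_of_nodup nd1 nd2).2 ?_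
  intro x
  constructor
  · intro hx
    rw [hv] at hx
    obtain ⟨k, hk, hxk⟩ := List.mem_map.1 hx
    obtain ⟨e, he, -, hg, -⟩ := pv_argmax_mem rows k hk
    exact List.mem_map.2 ⟨e, he, by rw [← hg, hxk]⟩
  · intro hx
    obtain ⟨e, he, rfl⟩ := List.mem_map.1 hx
    have hkmem : pvKey e ∈ L.keys := by
      rw [← PySem.Dict.contains_iff_mem_keys, hL, pv_foldA_contains]
      simp only [PySem.Dict.contains_empty, Bool.false_or, List.any_eq_true]
      exact ⟨e, hsubann e he, by simp⟩
    rw [hv]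
    exact List.mem_map.2 ⟨pvKey e, hkmem, pv_arg_unique rows e he⟩

def pvGetKey (r : List (String × String)) : String ×ₗ String :=
  toLex (pvGet r "symbol" "", pvGet r "horizon" "")

lemma pv_before_eq {α : Type} (k1 k2 : α → String) :
    (fun a b => decide (k1 a < k1 b) || (!decide (k1 b < k1 a) && decide (k2 a < k2 b)))
      = (fun a b => decide ((toLex (k1 a, k2 a) : String ×ₗ String) < toLex (k1 b, k2 b))) := by
  funext a b
  rcases lt_trichotomy (k1 a) (k1 b) with h | h | h <;>
    simp [Prod.Lex.lt_iff, h, not_lt_of_gt]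

lemma pv_sorted2_eq_sorted_lex {α : Type} (xs : List α) (k1 k2 : α → String) :
    PySem.List.sorted2 xs k1 k2 false
      = PySem.List.sorted xs (fun x => (toLex (k1 x, k2 x) : String ×ₗ String)) false := by
  show List.foldl (fun acc x => PySem.List.insertBy
      (fun a b => decide (k1 a < k1 b) || (!decide (k1 b < k1 a) && decide (k2 a < k2 b))) x acc) [] xs = _
  rw [pv_before_eq, ← PySem.List.sorted_eq_foldl_insertBy]

lemma pv_norm_of_key {r1 r2 : List (String × String)} (h : pvGetKey r1 = pvGetKey r2) :
    pvNorm r1 = pvNorm r2 := by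
  have h' : (pvGet r1 "symbol" "", pvGet r1 "horizon" "") = (pvGet r2 "symbol" "", pvGet r2 "horizon" "") := by
    simpa [pvGetKey] using congrArg ofLex h
  have h1 := congrArg Prod.fst h'
  have h2 := congrArg Prod.snd h'
  simp only at h1 h2
  simp [pvNorm, h1, h2]

-- main equality
theorem pv_main (rows : List (List (String × String))) :
    dedupe_latest_predictions_py rows = dedupe_latest_predictions_py_alt rows := by
  have hA : dedupe_latest_predictions_py rows
      = (PySem.List.sorted2
          (((PySem.List.enumerate rows 0).foldl pvStepA PySem.Dict.empty).values)
          (fun x => pvGet x.2.2 "symbol" "") (fun x => pvGet x.2.2 "horizon" "")).map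
            (fun x => x.2.2) := rfl
  rw [hA]
  rw [show dedupe_latest_predictions_py_alt rows
      = PySem.List.sorted2
          (((pvAnn (PySem.List.enumerate rows 0)).filter
              (pvKeep (pvAnn (PySem.List.enumerate rows 0)))).map (fun e => e.2.2.2.2))
          (fun r => pvGet r "symbol" "") (fun r => pvGet r "horizon" "") from by
    show PySem.List.sorted2
        ((((PySem.List.enumerate rows 0).foldl (fun acc p =>
          let symbol := PySem.Str.upper (pvGet p.2 "symbol" "")
          let horizon := PySem.Str.lower (pvGet p.2 "horizon" "")
          if symbol ≠ "" ∧ horizon ≠ "" then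
            acc ++ [(symbol, horizon, PySem.Str.strip (((PySem.Dict.mk p.2).get? "as_of").getD ""), p.1, p.2)]
          else acc) []).filter
            (pvKeep ((PySem.List.enumerate rows 0).foldl (fun acc p =>
          let symbol := PySem.Str.upper (pvGet p.2 "symbol" "")
          let horizon := PySem.Str.lower (pvGet p.2 "horizon" "")
          if symbol ≠ "" ∧ horizon ≠ "" then
            acc ++ [(symbol, horizon, PySem.Str.strip (((PySem.Dict.mk p.2).get? "as_of").getD ""), p.1, p.2)]
          else acc) []))).map (fun e => e.2.2.2.2))
          (fun r => pvGet r "symbol" "") (fun r => pvGet r "horizon" "") = _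
    rw [pv_foldB_eq, List.nil_append]]
  rw [pv_sorted2_eq_sorted_lex, pv_sorted2_eq_sorted_lex]
  set z := PySem.List.enumerate rows 0 with hz
  set VALs := (z.foldl pvStepA PySem.Dict.empty).values with hVALs
  set flt := (pvAnn z).filter (pvKeep (pvAnn z)) with hflt
  set survivors := flt.map (fun e => e.2.2.2.2) with hsurv
  have hperm0 : VALs.Perm (flt.map pvTrip) := pv_values_perm rows
  have hpermRow : (VALs.map (fun x => x.2.2)).Perm survivors := by
    refine (hperm0.map _).trans ?_
    rw [List.map_map]
    exact (List.Perm.refl _)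
  have hsubann : ∀ e, e ∈ flt → e ∈ pvAnn z := fun e he => (List.mem_filter.1 he).1
  have hpk := pv_filter_pairwise_key (pv_ann_pairwise_idx rows)
  have hKne : flt.Pairwise (fun a b => pvGetKey (pvRow a) ≠ pvGetKey (pvRow b)) := by
    refine hpk.imp_of_mem ?_
    intro a b ha hb hne hK
    exact hne (by
      rw [pv_key_of_mem_ann (hsubann a ha), pv_key_of_mem_ann (hsubann b hb), pv_norm_of_key hK])
  have hsurvK : (survivors.map pvGetKey).Nodup := by
    rw [hsurv, List.map_map, List.Nodup, List.pairwise_map]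
    exact hKne
  refine PySem.List.eq_of_perm_of_pairwise_le_of_pairwise_lt (key := pvGetKey) ?_ ?_ ?_
  · -- perm
    refine List.Perm.trans ?_ (PySem.List.sorted_perm survivors _ false).symm
    refine List.Perm.trans ((PySem.List.sorted_perm VALs _ false).map _) hpermRow
  · -- pairwise ≤ on A's side
    have h := PySem.List.sorted_pairwise VALs (fun x => pvGetKey x.2.2)
    rw [List.pairwise_map]
    exact h
  · -- pairwise < on B's side
    have hle := PySem.List.sorted_pairwise survivors pvGetKey
    have hndK : ((PySem.List.sorted survivors pvGetKey).map pvGetKey).Nodup := by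
      refine ((PySem.List.sorted_perm survivors pvGetKey false).map pvGetKey).nodup_iff.mpr ?_
      exact hsurvK
    have hne : (PySem.List.sorted survivors pvGetKey).Pairwise
        (fun a b => pvGetKey a ≠ pvGetKey b) := by
      rw [List.Nodup, List.pairwise_map] at hndK
      exact hndK
    refine (hle.and hne).imp ?_
    intro a b hab
    exact lt_of_le_of_ne hab.1 hab.2

-- ===== VERDICT (by name: the statement is the Claim_ definition above) =====
theorem dedupe_latest_predictions_py_spec : Claim_equal_dedupe_latest_predictions_py := by
  intro rows _
  unfold Spec_dedupe_latest_predictions_py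
  exact pv_main rows
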